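-- pv_equiv track=rewrite | github.com/gbreier/boston-mfg-website | simulator/backend/helpers.py | classify_disruption_type
-- ===== SOURCE A (Python) =====
-- def classify_disruption_type(title: str) -> str:
--     """Classify the type of supply chain disruption based on title."""
--     title_lower = title.lower()
--
--     if any(word in title_lower for word in ["tariff", "trade", "sanction", "ban"]):
--         return "Geopolitical/Trade"
--     elif any(word in title_lower for word in ["strike", "labor", "union", "worker"]):
--         return "Labor Issues"
--     elif any(word in title_lower for word in ["fire", "flood", "earthquake", "hurricane", "disaster"]):
--         return "Natural Disaster"
--     elif any(word in title_lower for word in ["cyber", "hack", "attack", "breach"]):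
--         return "Cybersecurity"
--     elif any(word in title_lower for word in ["shortage", "allocation", "capacity"]):
--         return "Supply Shortage"
--     elif any(word in title_lower for word in ["port", "shipping", "logistics", "transport"]):
--         return "Transportation/Logistics"
--     elif any(word in title_lower for word in ["recall", "quality", "defect", "safety"]):
--         return "Quality/Safety"
--     elif any(word in title_lower for word in ["bankruptcy", "closure", "shutdown", "financial"]):
--         return "Supplier Financial"
--     else:
--         return "Market/Economic"
-- ===== SOURCE B (Python) =====
-- # B: instead of an if/elif chain of per-category any() tests, map every keyword
-- # to the numeric priority of its branch, keep the minimum priority seen in one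
-- # flat pass over all keywords, and index a category list with it.
-- _KEYWORD_PRIORITY = {
--     "tariff": 0, "trade": 0, "sanction": 0, "ban": 0,
--     "strike": 1, "labor": 1, "union": 1, "worker": 1,
--     "fire": 2, "flood": 2, "earthquake": 2, "hurricane": 2, "disaster": 2,
--     "cyber": 3, "hack": 3, "attack": 3, "breach": 3,
--     "shortage": 4, "allocation": 4, "capacity": 4,
--     "port": 5, "shipping": 5, "logistics": 5, "transport": 5,
--     "recall": 6, "quality": 6, "defect": 6, "safety": 6,
--     "bankruptcy": 7, "closure": 7, "shutdown": 7, "financial": 7,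
-- }
--
-- _CATEGORIES = [
--     "Geopolitical/Trade",
--     "Labor Issues",
--     "Natural Disaster",
--     "Cybersecurity",
--     "Supply Shortage",
--     "Transportation/Logistics",
--     "Quality/Safety",
--     "Supplier Financial",
--     "Market/Economic",
-- ]
--
-- def classify_disruption_type(title: str) -> str:
--     """Classify the type of supply chain disruption based on title."""
--     title_lower = title.lower()
--     best = len(_CATEGORIES) - 1  # default: "Market/Economic"
--     for keyword, priority in _KEYWORD_PRIORITY.items():
--         if keyword in title_lower:
--             best = min(best, priority)
--     return _CATEGORIES[best]
-- ===== Notes on version B (the rewrite author's own statement) =====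
-- stated objective: alternative
-- what changed: Replaced the eight-branch if/elif chain of per-category any() tests by a flat keyword-to-priority map: one pass over all keywords maintains the minimum matched priority as a numeric accumulator, and the answer is a category list indexed by that minimum (default index 8).
import Mathlib
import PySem

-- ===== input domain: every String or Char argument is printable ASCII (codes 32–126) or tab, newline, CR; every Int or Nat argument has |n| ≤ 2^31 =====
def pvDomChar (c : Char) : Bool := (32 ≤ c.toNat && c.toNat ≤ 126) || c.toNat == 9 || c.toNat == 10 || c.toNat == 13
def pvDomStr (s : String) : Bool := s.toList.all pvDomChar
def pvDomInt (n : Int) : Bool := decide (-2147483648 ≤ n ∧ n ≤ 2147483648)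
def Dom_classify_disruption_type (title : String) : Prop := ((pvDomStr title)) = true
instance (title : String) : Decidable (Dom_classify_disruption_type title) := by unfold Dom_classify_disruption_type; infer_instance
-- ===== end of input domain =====

-- B replaces A's if/elif chain of per-category any() tests by a flat keyword->priority map folded to a minimum priority that indexes a category list (objective: alternative).


-- ===== PORT A =====
def classify_disruption_type (title : String) : String :=
  let title_lower := PySem.Str.lower title
  if ["tariff", "trade", "sanction", "ban"].any (fun word => PySem.Str.isIn word title_lower) then
    "Geopolitical/Trade"
  else if ["strike", "labor", "union", "worker"].any (fun word => PySem.Str.isIn word title_lower) then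
    "Labor Issues"
  else if ["fire", "flood", "earthquake", "hurricane", "disaster"].any (fun word => PySem.Str.isIn word title_lower) then
    "Natural Disaster"
  else if ["cyber", "hack", "attack", "breach"].any (fun word => PySem.Str.isIn word title_lower) then
    "Cybersecurity"
  else if ["shortage", "allocation", "capacity"].any (fun word => PySem.Str.isIn word title_lower) then
    "Supply Shortage"
  else if ["port", "shipping", "logistics", "transport"].any (fun word => PySem.Str.isIn word title_lower) then
    "Transportation/Logistics"
  else if ["recall", "quality", "defect", "safety"].any (fun word => PySem.Str.isIn word title_lower) then
    "Quality/Safety"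
  else if ["bankruptcy", "closure", "shutdown", "financial"].any (fun word => PySem.Str.isIn word title_lower) then
    "Supplier Financial"
  else
    "Market/Economic"

-- ===== PORT B =====
-- the _KEYWORD_PRIORITY dict: association list in insertion order (all keys distinct)
def keywordPriority : List (String × Nat) :=
  [ ("tariff", 0), ("trade", 0), ("sanction", 0), ("ban", 0),
    ("strike", 1), ("labor", 1), ("union", 1), ("worker", 1),
    ("fire", 2), ("flood", 2), ("earthquake", 2), ("hurricane", 2), ("disaster", 2),
    ("cyber", 3), ("hack", 3), ("attack", 3), ("breach", 3),
    ("shortage", 4), ("allocation", 4), ("capacity", 4),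
    ("port", 5), ("shipping", 5), ("logistics", 5), ("transport", 5),
    ("recall", 6), ("quality", 6), ("defect", 6), ("safety", 6),
    ("bankruptcy", 7), ("closure", 7), ("shutdown", 7), ("financial", 7) ]

def categoriesList : List String :=
  [ "Geopolitical/Trade", "Labor Issues", "Natural Disaster", "Cybersecurity",
    "Supply Shortage", "Transportation/Logistics", "Quality/Safety",
    "Supplier Financial", "Market/Economic" ]

def classify_disruption_type_alt (title : String) : String :=
  let title_lower := PySem.Str.lower title
  let best := keywordPriority.foldl
    (fun best kp => if PySem.Str.isIn kp.1 title_lower then min best kp.2 else best)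
    (categoriesList.length - 1)
  categoriesList.getD best ""

-- ===== PRECONDITION & SPEC =====
def Spec_classify_disruption_type (title : String) (out : String) : Prop := out = classify_disruption_type_alt title
instance (title : String) (out : String) : Decidable (Spec_classify_disruption_type title out) := by unfold Spec_classify_disruption_type; infer_instance

-- ===== CLAIM =====
def Claim_equal_classify_disruption_type : Prop := ∀ (title : String), Dom_classify_disruption_type title → Spec_classify_disruption_type title (classify_disruption_type title)

-- ===== LEMMAS AND PROOFS =====

-- folding a constant-priority segment of the table = one any() test
theorem segFold (s : String) (i : Nat) (kws : List String) (a : Nat) :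
    List.foldl (fun best kp => if PySem.Str.isIn kp.1 s then min best kp.2 else best) a
        (kws.map (fun k => (k, i)))
      = if kws.any (fun word => PySem.Str.isIn word s) then min a i else a := by
  induction kws generalizing a with
  | nil => simp
  | cons k t ih =>
      simp only [List.map_cons, List.foldl_cons, List.any_cons]
      rw [ih]
      rcases Bool.eq_false_or_eq_true (PySem.Str.isIn k s) with h | h <;>
        rcases Bool.eq_false_or_eq_true (t.any fun word => PySem.Str.isIn word s) with h2 | h2 <;>
        simp only [h, h2] <;> simp

theorem tableSplit :
    keywordPriority =
      (["tariff", "trade", "sanction", "ban"].map (fun k => (k, 0)))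
      ++ (["strike", "labor", "union", "worker"].map (fun k => (k, 1)))
      ++ (["fire", "flood", "earthquake", "hurricane", "disaster"].map (fun k => (k, 2)))
      ++ (["cyber", "hack", "attack", "breach"].map (fun k => (k, 3)))
      ++ (["shortage", "allocation", "capacity"].map (fun k => (k, 4)))
      ++ (["port", "shipping", "logistics", "transport"].map (fun k => (k, 5)))
      ++ (["recall", "quality", "defect", "safety"].map (fun k => (k, 6)))
      ++ (["bankruptcy", "closure", "shutdown", "financial"].map (fun k => (k, 7))) := rfl

-- ===== VERDICT =====
theorem classify_disruption_type_spec : Claim_equal_classify_disruption_type := by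
  intro title _
  unfold Spec_classify_disruption_type classify_disruption_type classify_disruption_type_alt
  simp only [tableSplit, List.foldl_append, segFold]
  cases hg0 : ["tariff", "trade", "sanction", "ban"].any (fun word => PySem.Str.isIn word (PySem.Str.lower title)) <;>
  cases hg1 : ["strike", "labor", "union", "worker"].any (fun word => PySem.Str.isIn word (PySem.Str.lower title)) <;>
  cases hg2 : ["fire", "flood", "earthquake", "hurricane", "disaster"].any (fun word => PySem.Str.isIn word (PySem.Str.lower title)) <;>
  cases hg3 : ["cyber", "hack", "attack", "breach"].any (fun word => PySem.Str.isIn word (PySem.Str.lower title)) <;>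
  cases hg4 : ["shortage", "allocation", "capacity"].any (fun word => PySem.Str.isIn word (PySem.Str.lower title)) <;>
  cases hg5 : ["port", "shipping", "logistics", "transport"].any (fun word => PySem.Str.isIn word (PySem.Str.lower title)) <;>
  cases hg6 : ["recall", "quality", "defect", "safety"].any (fun word => PySem.Str.isIn word (PySem.Str.lower title)) <;>
  cases hg7 : ["bankruptcy", "closure", "shutdown", "financial"].any (fun word => PySem.Str.isIn word (PySem.Str.lower title)) <;>
    rfl
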